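-- pv_equiv track=rewrite | github.com/yanwcai/Character-replacement- | 1337.py | toacronyms
-- ===== SOURCE A (Python) =====
-- def toacronyms(s):
--     for i in range(len(s)-1):
--         if s[i] == "B":
--             if s[i:i+10] == "BY THE WAY":
--                 s = s[:i]+"BTW"+s[i+10:]
--                 return s
--         else:
--             if s[i] == "L":
--                  if s[i:i+17] == "LAUGHING OUT LOUD":
--                      s = s[:i]+"LOL"+s[i+17:]
--                      return s
--             else:
--                 if s[i] == "O":
--                     if s[i:i+9] == "OH MY GOD":
--                         s = s[:i]+"OMG"+s[i+9:]
--                         return s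
--                 else:
--                     if s[i] == "F":
--                         if s[i:i+20] == "FOR YOUR INFORMATION":
--                             s = s[:i]+"FYI"+s[i+20:]
--                             return s
--     return s
-- ===== SOURCE B (Python) =====
-- def toacronyms(s):
--     table = {"BY THE WAY": "BTW", "LAUGHING OUT LOUD": "LOL",
--              "OH MY GOD": "OMG", "FOR YOUR INFORMATION": "FYI"}
--     best = None
--     for phrase, acr in table.items():
--         i = s.find(phrase)
--         if i >= 0 and (best is None or i < best[0]):
--             best = (i, phrase, acr)
--     if best is None:
--         return s
--     i, phrase, acr = best
--     return s[:i] + acr + s[i + len(phrase):]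
-- ===== Notes on version B (the rewrite author's own statement) =====
-- stated objective: simpler
-- what changed: A's single left-to-right scan with nested per-character branch dispatch is replaced by a table of phrase->acronym pairs, one s.find per phrase, and selection of the leftmost match (smallest find index), which is then spliced once.
import Mathlib
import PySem

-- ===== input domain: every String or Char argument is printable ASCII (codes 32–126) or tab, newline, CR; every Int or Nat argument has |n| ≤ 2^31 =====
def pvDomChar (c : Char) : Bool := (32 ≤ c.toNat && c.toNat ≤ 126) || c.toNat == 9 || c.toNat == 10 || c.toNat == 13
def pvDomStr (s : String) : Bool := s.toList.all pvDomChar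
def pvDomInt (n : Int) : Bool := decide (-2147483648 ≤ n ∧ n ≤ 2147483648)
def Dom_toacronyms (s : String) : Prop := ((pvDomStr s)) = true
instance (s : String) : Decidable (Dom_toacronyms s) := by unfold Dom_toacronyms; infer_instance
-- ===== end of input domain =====

-- B replaces A's single left-to-right scan with nested per-character dispatch by a phrase→acronym
-- table, one find per phrase, and a leftmost-match selection (objective: simpler).

-- ===== PORT A =====
-- A's for-loop over range(len(s)-1) with early return, as structural recursion: k counts the
-- remaining iterations (k = len(s)-1-i), i is the loop index.
-- s[i] is ported as getD i ' ' (the loop guard keeps i in range, so the default is never read);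
-- slices are PySem.List.slice on the code points.
def loopA (cs : List Char) (i : Nat) (k : Nat) : List Char :=
  match k with
  | 0 => cs
  | k + 1 =>
    if cs.getD i ' ' = 'B' then
      if PySem.List.slice cs (some (i : Int)) (some ((i : Int) + 10)) = "BY THE WAY".toList then
        PySem.List.slice cs none (some (i : Int)) ++ "BTW".toList ++
          PySem.List.slice cs (some ((i : Int) + 10)) none
      else loopA cs (i + 1) k
    else
      if cs.getD i ' ' = 'L' then
        if PySem.List.slice cs (some (i : Int)) (some ((i : Int) + 17)) = "LAUGHING OUT LOUD".toList then
          PySem.List.slice cs none (some (i : Int)) ++ "LOL".toList ++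
            PySem.List.slice cs (some ((i : Int) + 17)) none
        else loopA cs (i + 1) k
      else
        if cs.getD i ' ' = 'O' then
          if PySem.List.slice cs (some (i : Int)) (some ((i : Int) + 9)) = "OH MY GOD".toList then
            PySem.List.slice cs none (some (i : Int)) ++ "OMG".toList ++
              PySem.List.slice cs (some ((i : Int) + 9)) none
          else loopA cs (i + 1) k
        else
          if cs.getD i ' ' = 'F' then
            if PySem.List.slice cs (some (i : Int)) (some ((i : Int) + 20)) = "FOR YOUR INFORMATION".toList then
              PySem.List.slice cs none (some (i : Int)) ++ "FYI".toList ++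
                PySem.List.slice cs (some ((i : Int) + 20)) none
            else loopA cs (i + 1) k
          else loopA cs (i + 1) k

def toacronyms (s : String) : String := String.ofList (loopA s.toList 0 (s.toList.length - 1))

-- ===== PORT B =====
-- the dict of Source B, in insertion order
def pvTable : List (List Char × List Char) :=
  [("BY THE WAY".toList, "BTW".toList), ("LAUGHING OUT LOUD".toList, "LOL".toList),
   ("OH MY GOD".toList, "OMG".toList), ("FOR YOUR INFORMATION".toList, "FYI".toList)]

-- loop body of Source B: keep the candidate with the smallest nonnegative find index
def pvStep (cs : List Char) (best : Option (Int × List Char × List Char))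
    (pa : List Char × List Char) : Option (Int × List Char × List Char) :=
  let i := PySem.Chars.find cs pa.1
  let keep : Bool := decide (0 ≤ i) &&
    (match best with | none => true | some b => decide (i < b.1))
  if keep then some (i, pa.1, pa.2) else best

def toacronyms_alt (s : String) : String :=
  let cs := s.toList
  match pvTable.foldl (pvStep cs) none with
  | none => s
  | some (i, p, a) =>
      String.ofList (PySem.List.slice cs none (some i) ++ a ++
        PySem.List.slice cs (some (i + (p.length : Int))) none)

-- ===== PRECONDITION & SPEC =====
def Spec_toacronyms (s : String) (out : String) : Prop := out = toacronyms_alt s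
instance (s : String) (out : String) : Decidable (Spec_toacronyms s out) := by unfold Spec_toacronyms; infer_instance

-- ===== CLAIM (what is proved, stated in full; the proofs are below) =====
def Claim_equal_toacronyms : Prop := ∀ (s : String), Dom_toacronyms s → Spec_toacronyms s (toacronyms s)

-- ===== LEMMAS AND PROOFS =====

-- "some phrase matches at position j"
def pvM (cs : List Char) (j : Nat) : Prop := ∃ pa ∈ pvTable, pa.1 <+: cs.drop j

-- slice s[i:i+n] equals a phrase of length n iff the phrase is a prefix of drop i
theorem pvSlice_pref (cs p : List Char) (i n : Nat) (hp : p.length = n) :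
    (PySem.List.slice cs (some (i : Int)) (some ((i : Int) + (n : Int))) = p) ↔ p <+: cs.drop i := by
  rw [show ((i : Int) + (n : Int)) = (((i + n : Nat)) : Int) by push_cast; ring,
    PySem.List.slice_natCast]
  rw [show i + n - i = n by omega]
  rw [List.prefix_iff_eq_take, hp, eq_comm]

theorem pvHeadEq (cs p : List Char) (i : Nat) (h : p <+: cs.drop i) (hp : p ≠ []) :
    cs.getD i ' ' = p.getD 0 ' ' := by
  obtain ⟨t, ht⟩ := h
  have h0 : p.getD 0 ' ' = (cs.drop i).getD 0 ' ' := by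
    rw [← ht]; cases p with
    | nil => simp at hp
    | cons c cs' => simp
  rw [h0]
  simp [List.getD_eq_getElem?_getD, List.getElem?_drop]

theorem pvM_lt (cs : List Char) (j : Nat) (h : pvM cs j) : j < cs.length - 1 := by
  obtain ⟨pa, hmem, hpref⟩ := h
  have hlen := hpref.length_le
  rw [List.length_drop] at hlen
  simp only [pvTable, List.mem_cons, List.not_mem_nil, or_false] at hmem
  rcases hmem with h | h | h | h <;> subst h <;> simp at hlen <;> omega

theorem pvB_iff (cs : List Char) (i : Nat) :
    (PySem.List.slice cs (some (i : Int)) (some ((i : Int) + 10)) = "BY THE WAY".toList) ↔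
      "BY THE WAY".toList <+: cs.drop i := by
  exact_mod_cast pvSlice_pref cs "BY THE WAY".toList i 10 (by decide)

theorem pvL_iff (cs : List Char) (i : Nat) :
    (PySem.List.slice cs (some (i : Int)) (some ((i : Int) + 17)) = "LAUGHING OUT LOUD".toList) ↔
      "LAUGHING OUT LOUD".toList <+: cs.drop i := by
  exact_mod_cast pvSlice_pref cs "LAUGHING OUT LOUD".toList i 17 (by decide)

theorem pvO_iff (cs : List Char) (i : Nat) :
    (PySem.List.slice cs (some (i : Int)) (some ((i : Int) + 9)) = "OH MY GOD".toList) ↔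
      "OH MY GOD".toList <+: cs.drop i := by
  exact_mod_cast pvSlice_pref cs "OH MY GOD".toList i 9 (by decide)

theorem pvF_iff (cs : List Char) (i : Nat) :
    (PySem.List.slice cs (some (i : Int)) (some ((i : Int) + 20)) = "FOR YOUR INFORMATION".toList) ↔
      "FOR YOUR INFORMATION".toList <+: cs.drop i := by
  exact_mod_cast pvSlice_pref cs "FOR YOUR INFORMATION".toList i 20 (by decide)

theorem pvOut_eq (cs : List Char) (i : Nat) (n : Nat) (a : List Char) :
    PySem.List.slice cs none (some (i : Int)) ++ a ++
      PySem.List.slice cs (some ((i : Int) + (n : Int))) none = cs.take i ++ a ++ cs.drop (i + n) := by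
  rw [PySem.List.slice_to_natCast, show ((i : Int) + (n : Int)) = (((i + n : Nat)) : Int) by push_cast; ring,
    PySem.List.slice_from_natCast]

set_option maxHeartbeats 1000000 in
theorem loopA_nomatch (cs : List Char) (h : ∀ k, ¬ pvM cs k) :
    ∀ i k, loopA cs i k = cs := by
  intro i k
  fun_induction loopA cs i k with
  | case1 => rfl
  | case2 i k hc hs => exact absurd ⟨("BY THE WAY".toList, "BTW".toList), by simp [pvTable], (pvB_iff cs i).mp hs⟩ (h i)
  | case4 i k hc hc2 hs => exact absurd ⟨("LAUGHING OUT LOUD".toList, "LOL".toList), by simp [pvTable], (pvL_iff cs i).mp hs⟩ (h i)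
  | case6 i k hc hc2 hc3 hs => exact absurd ⟨("OH MY GOD".toList, "OMG".toList), by simp [pvTable], (pvO_iff cs i).mp hs⟩ (h i)
  | case8 i k hc hc2 hc3 hc4 hs => exact absurd ⟨("FOR YOUR INFORMATION".toList, "FYI".toList), by simp [pvTable], (pvF_iff cs i).mp hs⟩ (h i)
  | case3 i k hc hs ih => exact ih
  | case5 i k hc hc2 hs ih => exact ih
  | case7 i k hc hc2 hc3 hs ih => exact ih
  | case9 i k hc hc2 hc3 hc4 hs ih => exact ih
  | case10 i k hc hc2 hc3 hc4 ih => exact ih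

set_option maxHeartbeats 2000000 in
theorem loopA_hit (cs : List Char) (j : Nat) (p a : List Char)
    (hpa : (p, a) ∈ pvTable) (hm : p <+: cs.drop j) :
    ∀ i k, i + k = cs.length - 1 → i ≤ j → (∀ m, i ≤ m → m < j → ¬ pvM cs m) →
      loopA cs i k = cs.take j ++ a ++ cs.drop (j + p.length) := by
  have hjlt : j < cs.length - 1 := pvM_lt cs j ⟨(p, a), hpa, hm⟩
  have hne : p ≠ [] := by
    simp only [pvTable, List.mem_cons, List.not_mem_nil, or_false, Prod.mk.injEq] at hpa
    rcases hpa with ⟨h1, _⟩ | ⟨h1, _⟩ | ⟨h1, _⟩ | ⟨h1, _⟩ <;> subst h1 <;> decide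
  have hhead : cs.getD j ' ' = p.getD 0 ' ' := pvHeadEq cs p j hm hne
  have hpcases := hpa
  simp only [pvTable, List.mem_cons, List.not_mem_nil, or_false, Prod.mk.injEq] at hpcases
  intro i k
  show i + k = cs.length - 1 → i ≤ j → (∀ m, i ≤ m → m < j → ¬ pvM cs m) →
      loopA cs i k = cs.take j ++ a ++ cs.drop (j + p.length)
  fun_induction loopA cs i k with
  | case1 i =>
      intro hk hij hmin
      exact absurd hjlt (by omega)
  | case2 i k hc hs =>
      intro hk hij hmin
      have hpref := (pvB_iff cs i).mp hs
      have hieq : i = j := by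
        by_contra hne'
        exact hmin i le_rfl (by omega) ⟨("BY THE WAY".toList, "BTW".toList), by simp [pvTable], hpref⟩
      subst hieq
      rcases hpcases with ⟨h1, h2⟩ | ⟨h1, h2⟩ | ⟨h1, h2⟩ | ⟨h1, h2⟩ <;> subst h1 <;> subst h2 <;>
        first
        | (rw [show ("BY THE WAY".toList.length) = 10 from rfl]
           exact_mod_cast pvOut_eq cs i 10 "BTW".toList)
        | (exfalso; rw [hhead] at hc; exact absurd hc (by decide))
  | case4 i k hc hc2 hs =>
      intro hk hij hmin
      have hpref := (pvL_iff cs i).mp hs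
      have hieq : i = j := by
        by_contra hne'
        exact hmin i le_rfl (by omega) ⟨("LAUGHING OUT LOUD".toList, "LOL".toList), by simp [pvTable], hpref⟩
      subst hieq
      rcases hpcases with ⟨h1, h2⟩ | ⟨h1, h2⟩ | ⟨h1, h2⟩ | ⟨h1, h2⟩ <;> subst h1 <;> subst h2 <;>
        first
        | (rw [show ("LAUGHING OUT LOUD".toList.length) = 17 from rfl]
           exact_mod_cast pvOut_eq cs i 17 "LOL".toList)
        | (exfalso; rw [hhead] at hc2; exact absurd hc2 (by decide))
  | case6 i k hc hc2 hc3 hs =>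
      intro hk hij hmin
      have hpref := (pvO_iff cs i).mp hs
      have hieq : i = j := by
        by_contra hne'
        exact hmin i le_rfl (by omega) ⟨("OH MY GOD".toList, "OMG".toList), by simp [pvTable], hpref⟩
      subst hieq
      rcases hpcases with ⟨h1, h2⟩ | ⟨h1, h2⟩ | ⟨h1, h2⟩ | ⟨h1, h2⟩ <;> subst h1 <;> subst h2 <;>
        first
        | (rw [show ("OH MY GOD".toList.length) = 9 from rfl]
           exact_mod_cast pvOut_eq cs i 9 "OMG".toList)
        | (exfalso; rw [hhead] at hc3; exact absurd hc3 (by decide))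
  | case8 i k hc hc2 hc3 hc4 hs =>
      intro hk hij hmin
      have hpref := (pvF_iff cs i).mp hs
      have hieq : i = j := by
        by_contra hne'
        exact hmin i le_rfl (by omega) ⟨("FOR YOUR INFORMATION".toList, "FYI".toList), by simp [pvTable], hpref⟩
      subst hieq
      rcases hpcases with ⟨h1, h2⟩ | ⟨h1, h2⟩ | ⟨h1, h2⟩ | ⟨h1, h2⟩ <;> subst h1 <;> subst h2 <;>
        first
        | (rw [show ("FOR YOUR INFORMATION".toList.length) = 20 from rfl]
           exact_mod_cast pvOut_eq cs i 20 "FYI".toList)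
        | (exfalso; rw [hhead] at hc4; exact absurd hc4 (by decide))
  | case3 i k hc hs ih =>
      intro hk hij hmin
      have hilt : i < j := by
        rcases Nat.lt_or_ge i j with h' | h'
        · exact h'
        · exfalso
          have hieq : i = j := by omega
          subst hieq
          rcases hpcases with ⟨h1, h2⟩ | ⟨h1, h2⟩ | ⟨h1, h2⟩ | ⟨h1, h2⟩ <;> subst h1 <;>
            first
            | exact hs ((pvB_iff cs i).mpr hm)
            | (rw [hhead] at hc; exact absurd hc (by decide))
      exact ih (by omega) (by omega) (fun m hm1 hm2 => hmin m (by omega) hm2)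
  | case5 i k hc hc2 hs ih =>
      intro hk hij hmin
      have hilt : i < j := by
        rcases Nat.lt_or_ge i j with h' | h'
        · exact h'
        · exfalso
          have hieq : i = j := by omega
          subst hieq
          rcases hpcases with ⟨h1, h2⟩ | ⟨h1, h2⟩ | ⟨h1, h2⟩ | ⟨h1, h2⟩ <;> subst h1 <;>
            first
            | exact hs ((pvL_iff cs i).mpr hm)
            | (rw [hhead] at hc2; exact absurd hc2 (by decide))
      exact ih (by omega) (by omega) (fun m hm1 hm2 => hmin m (by omega) hm2)
  | case7 i k hc hc2 hc3 hs ih =>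
      intro hk hij hmin
      have hilt : i < j := by
        rcases Nat.lt_or_ge i j with h' | h'
        · exact h'
        · exfalso
          have hieq : i = j := by omega
          subst hieq
          rcases hpcases with ⟨h1, h2⟩ | ⟨h1, h2⟩ | ⟨h1, h2⟩ | ⟨h1, h2⟩ <;> subst h1 <;>
            first
            | exact hs ((pvO_iff cs i).mpr hm)
            | (rw [hhead] at hc3; exact absurd hc3 (by decide))
      exact ih (by omega) (by omega) (fun m hm1 hm2 => hmin m (by omega) hm2)
  | case9 i k hc hc2 hc3 hc4 hs ih =>
      intro hk hij hmin
      have hilt : i < j := by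
        rcases Nat.lt_or_ge i j with h' | h'
        · exact h'
        · exfalso
          have hieq : i = j := by omega
          subst hieq
          rcases hpcases with ⟨h1, h2⟩ | ⟨h1, h2⟩ | ⟨h1, h2⟩ | ⟨h1, h2⟩ <;> subst h1 <;>
            first
            | exact hs ((pvF_iff cs i).mpr hm)
            | (rw [hhead] at hc4; exact absurd hc4 (by decide))
      exact ih (by omega) (by omega) (fun m hm1 hm2 => hmin m (by omega) hm2)
  | case10 i k hc hc2 hc3 hc4 ih =>
      intro hk hij hmin
      have hilt : i < j := by
        rcases Nat.lt_or_ge i j with h' | h'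
        · exact h'
        · exfalso
          have hieq : i = j := by omega
          subst hieq
          rcases hpcases with ⟨h1, h2⟩ | ⟨h1, h2⟩ | ⟨h1, h2⟩ | ⟨h1, h2⟩ <;> subst h1 <;>
            first
            | (exact hc (by rw [hhead]; decide))
            | (exact hc2 (by rw [hhead]; decide))
            | (exact hc3 (by rw [hhead]; decide))
            | (exact hc4 (by rw [hhead]; decide))
      exact ih (by omega) (by omega) (fun m hm1 hm2 => hmin m (by omega) hm2)

-- find is nonnegative iff the phrase matches somewhere
theorem pvFind_nonneg_iff (cs q : List Char) :
    0 ≤ PySem.Chars.find cs q ↔ ∃ j, q <+: cs.drop j := by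
  rw [PySem.Chars.find_nonneg_iff, ← PySem.Chars.isIn_iff_infix,
    ← PySem.Chars.exists_prefix_drop_iff_isIn]

-- invariant of Source B's loop over the table
def pvInv (cs : List Char) (l : List (List Char × List Char))
    (acc : Option (Int × List Char × List Char)) : Prop :=
  match acc with
  | none => ∀ pa ∈ l, PySem.Chars.find cs pa.1 = -1
  | some (i, p, a) => (p, a) ∈ l ∧ PySem.Chars.find cs p = i ∧ 0 ≤ i ∧
      ∀ pa ∈ l, 0 ≤ PySem.Chars.find cs pa.1 → i ≤ PySem.Chars.find cs pa.1

theorem pvStep_none (cs : List Char) (pa : List Char × List Char) :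
    pvStep cs none pa = (if 0 ≤ PySem.Chars.find cs pa.1 then
      some (PySem.Chars.find cs pa.1, pa.1, pa.2) else none) := by
  by_cases h : 0 ≤ PySem.Chars.find cs pa.1 <;> simp [pvStep, h]

theorem pvStep_some (cs : List Char) (pa : List Char × List Char) (j : Int) (p0 a0 : List Char) :
    pvStep cs (some (j, p0, a0)) pa = (if 0 ≤ PySem.Chars.find cs pa.1 ∧ PySem.Chars.find cs pa.1 < j
      then some (PySem.Chars.find cs pa.1, pa.1, pa.2) else some (j, p0, a0)) := by
  by_cases h1 : 0 ≤ PySem.Chars.find cs pa.1 <;> by_cases h2 : PySem.Chars.find cs pa.1 < j <;>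
    simp [pvStep, h1, h2]

theorem pvFold_inv (cs : List Char) (l : List (List Char × List Char)) :
    ∀ done acc, pvInv cs done acc → pvInv cs (done ++ l) (l.foldl (pvStep cs) acc) := by
  induction l with
  | nil => intro done acc h; simpa using h
  | cons pa l ih =>
      intro done acc hacc
      have hge := PySem.Chars.neg_one_le_find cs pa.1
      have hstep : pvInv cs (done ++ [pa]) (pvStep cs acc pa) := by
        cases acc with
        | none =>
            simp only [pvInv] at hacc
            rw [pvStep_none]
            split_ifs with h0
            · refine ⟨by simp, rfl, h0, ?_⟩
              intro q hq hq0
              rcases List.mem_append.mp hq with hq | hq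
              · have := hacc q hq; omega
              · simp only [List.mem_singleton] at hq; subst hq; exact le_refl _
            · intro q hq
              rcases List.mem_append.mp hq with hq | hq
              · exact hacc q hq
              · simp only [List.mem_singleton] at hq; subst hq; omega
        | some b =>
            obtain ⟨j, p0, a0⟩ := b
            obtain ⟨hmem, hfind, hj0, hmin⟩ := hacc
            rw [pvStep_some]
            split_ifs with hk
            · refine ⟨by simp, rfl, hk.1, ?_⟩
              intro q hq hq0
              rcases List.mem_append.mp hq with hq | hq
              · have := hmin q hq hq0; omega
              · simp only [List.mem_singleton] at hq; subst hq; exact le_refl _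
            · refine ⟨List.mem_append_left _ hmem, hfind, hj0, ?_⟩
              intro q hq hq0
              rcases List.mem_append.mp hq with hq | hq
              · exact hmin q hq hq0
              · simp only [List.mem_singleton] at hq; subst hq; omega
      have := ih (done ++ [pa]) (pvStep cs acc pa) hstep
      simpa [List.append_assoc] using this

theorem pvMaster_none (s : String)
    (h : ∀ pa ∈ pvTable, PySem.Chars.find s.toList pa.1 = -1) :
    toacronyms s = s := by
  have hnone : ∀ k, ¬ pvM s.toList k := by
    intro k ⟨pa, hmem, hpref⟩
    have h0 : 0 ≤ PySem.Chars.find s.toList pa.1 :=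
      (pvFind_nonneg_iff s.toList pa.1).mpr ⟨k, hpref⟩
    rw [h pa hmem] at h0
    omega
  rw [toacronyms, loopA_nomatch s.toList hnone 0 (s.toList.length - 1)]
  simp

theorem pvMaster_some (s : String) (i : Int) (p a : List Char)
    (hpa : (p, a) ∈ pvTable) (hf : PySem.Chars.find s.toList p = i) (h0 : 0 ≤ i)
    (hmin : ∀ pa' ∈ pvTable, 0 ≤ PySem.Chars.find s.toList pa'.1 →
      i ≤ PySem.Chars.find s.toList pa'.1) :
    toacronyms s = String.ofList (PySem.List.slice s.toList none (some i) ++ a ++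
      PySem.List.slice s.toList (some (i + (p.length : Int))) none) := by
  have hsp := PySem.Chars.find_spec (hf ▸ h0 : 0 ≤ PySem.Chars.find s.toList p)
  rw [hf] at hsp
  obtain ⟨hpre, hfirst⟩ := hsp
  have hmin' : ∀ k, 0 ≤ k → k < i.toNat → ¬ pvM s.toList k := by
    intro k _ hk ⟨pa, hmem, hpref⟩
    have h0' : 0 ≤ PySem.Chars.find s.toList pa.1 :=
      (pvFind_nonneg_iff s.toList pa.1).mpr ⟨k, hpref⟩
    have hle : i ≤ PySem.Chars.find s.toList pa.1 := hmin pa hmem h0'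
    have hsp' := PySem.Chars.find_spec h0'
    have : ¬ (k < (PySem.Chars.find s.toList pa.1).toNat) := fun hlt => hsp'.2 k hlt hpref
    omega
  rw [toacronyms, loopA_hit s.toList i.toNat p a hpa hpre 0 (s.toList.length - 1) (by omega) (by omega) hmin']
  rw [PySem.List.slice_to s.toList h0, PySem.List.slice_from s.toList (by omega : (0:Int) ≤ i + (p.length : Int))]
  have : (i + (p.length : Int)).toNat = i.toNat + p.length := by omega
  rw [this]

-- ===== VERDICT (by name: the statement is the Claim_ definition above) =====
theorem toacronyms_spec : Claim_equal_toacronyms := by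
  intro s _
  have hinv := pvFold_inv s.toList pvTable [] none (by intro pa h; simp at h)
  simp only [List.nil_append] at hinv
  cases h : pvTable.foldl (pvStep s.toList) none with
  | none =>
      rw [h] at hinv
      simp only [Spec_toacronyms, toacronyms_alt, h]
      exact pvMaster_none s hinv
  | some x =>
      obtain ⟨i, p, a⟩ := x
      rw [h] at hinv
      obtain ⟨hpa, hf, h0, hmin⟩ := hinv
      simp only [Spec_toacronyms, toacronyms_alt, h]
      exact pvMaster_some s i p a hpa hf h0 hmin
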